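-- pv_equiv track=rewrite | github.com/DHCross/book-md-tools | tools/spell_check.py | find_word_contexts
-- ===== SOURCE A (Python) =====
-- def find_word_contexts(content, word, max_contexts=5):
--     """Find contexts where a potentially misspelled word appears"""
--     contexts = []
--     lines = content.split('\n')
--
--     for i, line in enumerate(lines):
--         if word.lower() in line.lower():
--             # Get some context around the line
--             start_line = max(0, i - 1)
--             end_line = min(len(lines), i + 2)
--             context = '\n'.join(lines[start_line:end_line])
--             contexts.append(f"Line {i+1}: {context}")
--
--             if len(contexts) >= max_contexts:
--                 break
--
--     return contexts
-- ===== SOURCE B (Python) =====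
-- def find_word_contexts(content, word, max_contexts=5):
--     """Find contexts where a potentially misspelled word appears"""
--     needle = word.lower()
--     contexts = []
--     remaining = max_contexts
--     prev = []        # the previous line, as a 0/1-element window
--     pending = None   # a snippet waiting for its following line: (lineno, window)
--     lineno = 0
--     for line in content.split('\n'):
--         lineno += 1
--         if pending is not None:
--             no, window = pending
--             contexts.append(f"Line {no}: " + '\n'.join(window + [line]))
--             pending = None
--         if remaining > 0 and needle in line.lower():
--             pending = (lineno, prev + [line])
--             remaining -= 1
--         prev = [line]
--     if pending is not None:
--         no, window = pending
--         contexts.append(f"Line {no}: " + '\n'.join(window))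
--     return contexts
-- ===== Notes on version B (the rewrite author's own statement) =====
-- stated objective: alternative
-- what changed: Replaces A's index-based scan (enumerate + max/min slicing into the full line list per match) with a streaming one-pass that never indexes or slices: it carries a one-line 'prev' window and a deferred 'pending' snippet that is completed when the following line arrives (or flushed without it at end of input), with a countdown of remaining slots instead of a break.
-- intended difference: When max_contexts <= 0 and some line contains the word, A still returns one context snippet because its break test runs only after appending, while B returns the empty list, which is the intended meaning of asking for at most zero contexts. — e.g. on find_word_contexts("hi", "hi", 0): A returns ["Line 1: hi"], B returns []
import Mathlib
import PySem

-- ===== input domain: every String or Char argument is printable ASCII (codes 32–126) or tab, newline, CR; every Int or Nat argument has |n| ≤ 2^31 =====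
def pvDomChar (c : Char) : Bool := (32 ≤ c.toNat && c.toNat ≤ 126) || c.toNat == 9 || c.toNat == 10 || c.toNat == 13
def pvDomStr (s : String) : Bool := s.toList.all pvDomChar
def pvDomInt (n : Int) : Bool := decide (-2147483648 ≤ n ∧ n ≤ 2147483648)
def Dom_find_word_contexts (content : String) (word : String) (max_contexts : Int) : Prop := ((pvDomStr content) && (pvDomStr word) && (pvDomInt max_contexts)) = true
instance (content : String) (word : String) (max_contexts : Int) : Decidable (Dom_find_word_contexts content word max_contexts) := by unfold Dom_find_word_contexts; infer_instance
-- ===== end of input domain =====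

-- B replaces A's indexed scan with per-match slicing by a streaming one-pass (prev-window + deferred
-- pending snippet, countdown instead of break); intended difference: for max_contexts <= 0 with a
-- matching line A still returns one snippet, B returns [].


-- ===== PORT A =====
-- content.split('\n'); the separator is nonempty so Str.split? is always some and getD is exact
def fwcLines (content : String) : List String := (PySem.Str.split? content "\n").getD []

-- the f"Line {no}: {'\n'.join(window)}" formatting both Pythons share
def fwcSnip (no : Int) (window : List String) : String :=
  "Line " ++ PySem.Int.toStr no ++ ": " ++ PySem.Str.join "\n" window

-- A's snippet at matching 0-based index i: slice of the full line list
def fwcCtx (lines : List String) (i : Int) : String :=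
  fwcSnip (i + 1)
    (PySem.List.slice lines (some (max 0 (i - 1))) (some (min (lines.length : Int) (i + 2))))

-- A's for-loop over enumerate(lines) with append and early break
def fwcLoopA (lines : List String) (word : String) (max_contexts : Int) :
    List (Int × String) → List String → List String
  | [], contexts => contexts
  | (i, line) :: rest, contexts =>
    if PySem.Str.isIn (PySem.Str.lower word) (PySem.Str.lower line) then
      let contexts' := contexts ++ [fwcCtx lines i]
      if max_contexts ≤ (contexts'.length : Int) then contexts'
      else fwcLoopA lines word max_contexts rest contexts'
    else fwcLoopA lines word max_contexts rest contexts

def find_word_contexts (content : String) (word : String) (max_contexts : Int) : List String :=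
  fwcLoopA (fwcLines content) word max_contexts (PySem.List.enumerate (fwcLines content) 0) []

-- ===== PORT B =====
-- B's streaming loop: prev is the previous line as a 0/1-element window, pending a snippet that
-- waits for its following line; a countdown 'remaining' replaces the break
def fwcLoopB (needle : String) :
    List String → Int → List String → Option (Int × List String) → Int → List String → List String
  | [], _remaining, _prev, pending, _lineno, contexts =>
    match pending with
    | some (no, w) => contexts ++ [fwcSnip no w]
    | none => contexts
  | line :: rest, remaining, prev, pending, lineno, contexts =>
    if 0 < remaining ∧ PySem.Str.isIn needle (PySem.Str.lower line) = true then
      fwcLoopB needle rest (remaining - 1) [line] (some (lineno + 1, prev ++ [line])) (lineno + 1)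
        (match pending with
         | some (no, w) => contexts ++ [fwcSnip no (w ++ [line])]
         | none => contexts)
    else
      fwcLoopB needle rest remaining [line] none (lineno + 1)
        (match pending with
         | some (no, w) => contexts ++ [fwcSnip no (w ++ [line])]
         | none => contexts)

def find_word_contexts_alt (content : String) (word : String) (max_contexts : Int) : List String :=
  fwcLoopB (PySem.Str.lower word) (fwcLines content) max_contexts [] none 0 []

-- ===== PRECONDITION & SPEC =====
-- When max_contexts ≤ 0 and some line contains the word, A still returns one snippet (its break test
-- runs only after appending); B returns [], the intended value for "at most zero contexts".
def D_find_word_contexts (content : String) (word : String) (max_contexts : Int) : Prop :=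
  max_contexts ≤ 0 ∧
    ((PySem.Str.split? content "\n").getD []).any
      (fun line => PySem.Str.isIn (PySem.Str.lower word) (PySem.Str.lower line)) = true

instance (content : String) (word : String) (max_contexts : Int) :
    Decidable (D_find_word_contexts content word max_contexts) := by
  unfold D_find_word_contexts; infer_instance

def Spec_find_word_contexts (content : String) (word : String) (max_contexts : Int) (out : List String) : Prop :=
  ¬ D_find_word_contexts content word max_contexts → out = find_word_contexts_alt content word max_contexts

instance (content : String) (word : String) (max_contexts : Int) (out : List String) :
    Decidable (Spec_find_word_contexts content word max_contexts out) := by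
  unfold Spec_find_word_contexts; infer_instance

def pvDiffWitness_find_word_contexts : String × String × Int := ("hi", "hi", 0)
def pvDiffWitnessOut_find_word_contexts : (List String) × (List String) := (["Line 1: hi"], [])

-- ===== CLAIM (what is proved, stated in full; the proofs are below) =====
def Claim_unchanged_find_word_contexts : Prop := ∀ (content : String) (word : String) (max_contexts : Int), Dom_find_word_contexts content word max_contexts → Spec_find_word_contexts content word max_contexts (find_word_contexts content word max_contexts)
def Claim_changed_find_word_contexts : Prop := Dom_find_word_contexts (pvDiffWitness_find_word_contexts.1) (pvDiffWitness_find_word_contexts.2.1) (pvDiffWitness_find_word_contexts.2.2) ∧ D_find_word_contexts (pvDiffWitness_find_word_contexts.1) (pvDiffWitness_find_word_contexts.2.1) (pvDiffWitness_find_word_contexts.2.2) ∧ find_word_contexts (pvDiffWitness_find_word_contexts.1) (pvDiffWitness_find_word_contexts.2.1) (pvDiffWitness_find_word_contexts.2.2) = pvDiffWitnessOut_find_word_contexts.1 ∧ find_word_contexts_alt (pvDiffWitness_find_word_contexts.1) (pvDiffWitness_find_word_contexts.2.1) (pvDiffWitness_find_word_contexts.2.2) = pvDiffWitnessOut_find_word_contexts.2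 ∧ pvDiffWitnessOut_find_word_contexts.1 ≠ pvDiffWitnessOut_find_word_contexts.2
def Claim_exact_find_word_contexts : Prop := ∀ (content : String) (word : String) (max_contexts : Int), Dom_find_word_contexts content word max_contexts → D_find_word_contexts content word max_contexts → find_word_contexts content word max_contexts ≠ find_word_contexts_alt content word max_contexts

-- ===== LEMMAS AND PROOFS =====

-- A's loop never matches: it returns the accumulator untouched
theorem fwcLoopA_no_match (lines : List String) (word : String) (mc : Int)
    (es : List (Int × String)) (acc : List String)
    (h : ∀ p ∈ es, PySem.Str.isIn (PySem.Str.lower word) (PySem.Str.lower p.2) = false) :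
    fwcLoopA lines word mc es acc = acc := by
  induction es generalizing acc with
  | nil => rfl
  | cons p rest ih =>
    obtain ⟨i, line⟩ := p
    have hp := h (i, line) (List.mem_cons_self)
    simp only [fwcLoopA, hp, Bool.false_eq_true, if_false]
    exact ih acc (fun q hq => h q (List.mem_cons_of_mem _ hq))

-- A's loop with room left (acc shorter than mc) = append the snippets of the first
-- (mc - |acc|) matching indices
theorem fwcLoopA_eq (lines : List String) (word : String) (mc : Int)
    (es : List (Int × String)) (acc : List String) (h : (acc.length : Int) < mc) :
    fwcLoopA lines word mc es acc =
      acc ++ ((((es.filter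
          (fun p => PySem.Str.isIn (PySem.Str.lower word) (PySem.Str.lower p.2))).map Prod.fst).take
            (mc - acc.length).toNat).map (fwcCtx lines)) := by
  induction es generalizing acc with
  | nil => simp [fwcLoopA]
  | cons p rest ih =>
    obtain ⟨i, line⟩ := p
    by_cases hm : PySem.Str.isIn (PySem.Str.lower word) (PySem.Str.lower line) = true
    · simp only [fwcLoopA, hm, if_true, List.filter_cons_of_pos, List.map_cons]
      by_cases hstop : mc ≤ ((acc ++ [fwcCtx lines i]).length : Int)
      · have hmc : (mc - acc.length).toNat = 1 := by
          simp only [List.length_append, List.length_cons, List.length_nil] at hstop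
          omega
        simp only [hstop, if_true, hmc, List.take_succ_cons, List.take_zero, List.map_cons,
          List.map_nil]
      · have hlt : (((acc ++ [fwcCtx lines i]).length : Int)) < mc := by omega
        simp only [hstop, if_false]
        rw [ih _ hlt]
        have hsplit : (mc - acc.length).toNat = (mc - (acc ++ [fwcCtx lines i]).length).toNat + 1 := by
          simp only [List.length_append, List.length_cons, List.length_nil]
          omega
        rw [hsplit, List.take_succ_cons, List.map_cons, List.append_assoc]
        rfl
    · have hm' : PySem.Str.isIn (PySem.Str.lower word) (PySem.Str.lower line) = false := by
        simpa using hm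
      simp only [fwcLoopA, List.filter_cons, hm', Bool.false_eq_true, if_false]
      exact ih acc h

-- A's loop returns a nonempty list as soon as a match exists (or the accumulator is nonempty)
theorem fwcLoopA_ne_nil (lines : List String) (word : String) (mc : Int)
    (es : List (Int × String)) (acc : List String)
    (h : (∃ p ∈ es, PySem.Str.isIn (PySem.Str.lower word) (PySem.Str.lower p.2) = true) ∨ acc ≠ []) :
    fwcLoopA lines word mc es acc ≠ [] := by
  induction es generalizing acc with
  | nil =>
    rcases h with ⟨p, hp, _⟩ | h
    · exact absurd hp (List.not_mem_nil)
    · simpa [fwcLoopA] using h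
  | cons p rest ih =>
    obtain ⟨i, line⟩ := p
    by_cases hm : PySem.Str.isIn (PySem.Str.lower word) (PySem.Str.lower line) = true
    · simp only [fwcLoopA, hm, if_true]
      by_cases hstop : mc ≤ ((acc ++ [fwcCtx lines i]).length : Int)
      · rw [if_pos (by simpa using hstop)]
        simp
      · rw [if_neg (by simpa using hstop)]
        exact ih _ (Or.inr (by simp))
    · have hm' : PySem.Str.isIn (PySem.Str.lower word) (PySem.Str.lower line) = false := by
        simpa using hm
      simp only [fwcLoopA, hm', Bool.false_eq_true, if_false]
      refine ih acc ?_
      rcases h with ⟨q, hq, hmq⟩ | h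
      · rcases List.mem_cons.mp hq with rfl | hq'
        · exact absurd hmq hm
        · exact Or.inl ⟨q, hq', hmq⟩
      · exact Or.inr h

-- the value B's pending buffer contributes once the following lines are known
def fwcFlush (pending : Option (Int × List String)) (rest : List String) : List String :=
  match pending with
  | none => []
  | some (no, w) => [fwcSnip no (w ++ rest.take 1)]

-- A's slice window at a matching index k equals B's streamed window (prev line ++ next two lines)
theorem fwcCtx_window (lines : List String) (k : Nat) (h : k < lines.length) :
    fwcCtx lines (k : Int) =
      fwcSnip ((k : Int) + 1) ((lines.take k).drop (k - 1) ++ (lines.drop k).take 2) := by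
  unfold fwcCtx
  congr 1
  have h0 : (0 : Int) ≤ max 0 ((k : Int) - 1) := le_max_left _ _
  have h1 : (0 : Int) ≤ min (lines.length : Int) ((k : Int) + 2) := by
    have : (0:Int) ≤ (lines.length : Int) := Int.natCast_nonneg _
    omega
  rw [PySem.List.slice_toNat lines h0 h1]
  have ha : (max 0 ((k : Int) - 1)).toNat = k - 1 := by omega
  have hb : (min (lines.length : Int) ((k : Int) + 2)).toNat = min lines.length (k + 2) := by omega
  rw [ha, hb]
  rcases Nat.eq_zero_or_pos k with rfl | hk
  · simp only [Nat.zero_sub, List.drop_zero, List.take_zero, List.nil_append]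
    by_cases hle : lines.length ≤ 2
    · rw [min_eq_left hle, Nat.sub_zero, List.take_of_length_le (le_refl _),
        List.take_of_length_le hle]
    · rw [min_eq_right (by omega), Nat.sub_zero]

  · have htk : (lines.take k).drop (k - 1) = (lines.drop (k - 1)).take 1 := by
      rw [List.drop_take]
      congr 1
      omega
    have hdk : lines.drop k = (lines.drop (k - 1)).drop 1 := by
      rw [List.drop_drop]
      congr 1
      omega
    rw [htk, hdk, ← List.take_add]
    by_cases hle : lines.length ≤ k + 2
    · have hlen : (lines.drop (k - 1)).length ≤ min lines.length (k + 2) - (k - 1) := by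
        simp only [List.length_drop]
        omega
      rw [List.take_of_length_le hlen, List.take_of_length_le (by simp [List.length_drop]; omega)]
    · rw [min_eq_right (by omega)]
      congr 1
      omega

-- one unfolding step of B's loop: flush the pending snippet, then maybe defer a new one
theorem fwcLoopB_cons (needle line : String) (rest : List String) (remaining : Int)
    (prev : List String) (pending : Option (Int × List String)) (lineno : Int)
    (contexts : List String) :
    fwcLoopB needle (line :: rest) remaining prev pending lineno contexts =
      if 0 < remaining ∧ PySem.Str.isIn needle (PySem.Str.lower line) = true then
        fwcLoopB needle rest (remaining - 1) [line] (some (lineno + 1, prev ++ [line]))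
          (lineno + 1) (contexts ++ fwcFlush pending (line :: rest))
      else
        fwcLoopB needle rest remaining [line] none (lineno + 1)
          (contexts ++ fwcFlush pending (line :: rest)) := by
  cases pending with
  | none => simp [fwcLoopB, fwcFlush]
  | some p => obtain ⟨no, w⟩ := p; simp [fwcLoopB, fwcFlush]

-- B's streaming loop, started at suffix lines.drop k with the matching state, equals
-- "flush the pending snippet, then the snippets of the next 'remaining' matching lines"
theorem fwcLoopB_eq (needle : String) (lines : List String) :
    ∀ (rest : List String) (k : Nat) (remaining : Int)
      (pending : Option (Int × List String)) (contexts : List String),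
      rest = lines.drop k →
      fwcLoopB needle rest remaining ((lines.take k).drop (k - 1)) pending (k : Int) contexts =
        contexts ++ fwcFlush pending rest ++
          (((((PySem.List.enumerate rest (k : Int)).filter
              (fun p => PySem.Str.isIn needle (PySem.Str.lower p.2))).map Prod.fst).take
                remaining.toNat).map (fwcCtx lines)) := by
  intro rest
  induction rest with
  | nil =>
    intro k remaining pending contexts _
    cases pending with
    | none => simp [fwcLoopB, fwcFlush, PySem.List.enumerate]
    | some p =>
      obtain ⟨no, w⟩ := p
      simp [fwcLoopB, fwcFlush, PySem.List.enumerate]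
  | cons line rest' ih =>
    intro k remaining pending contexts hrest
    have hk : k < lines.length := by
      by_contra hge
      rw [List.drop_eq_nil_of_le (by omega)] at hrest
      exact List.cons_ne_nil _ _ hrest
    have hget : lines[k]? = some line := by
      rw [← Nat.add_zero k, ← List.getElem?_drop, ← hrest]
      rfl
    have hline : lines[k] = line := by
      rw [List.getElem?_eq_getElem hk] at hget
      exact Option.some.inj hget
    have hrest' : rest' = lines.drop (k + 1) := by
      have ht : (lines.drop k).tail = lines.drop (k + 1) := List.tail_drop
      rw [← hrest] at ht
      simpa using ht
    have hprev1 : ((lines.take (k + 1)).drop ((k + 1) - 1)) = [line] := by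
      rw [Nat.add_sub_cancel, List.drop_take, ← hrest]
      simp
    have hcast : ((k : Int) + 1) = ((k + 1 : Nat) : Int) := by push_cast; ring
    have henum : PySem.List.enumerate (line :: rest') (k : Int) =
        ((k : Int), line) :: PySem.List.enumerate rest' ((k : Int) + 1) :=
      PySem.List.enumerate_cons _ _ _
    rw [fwcLoopB_cons]
    by_cases hc : 0 < remaining ∧ PySem.Str.isIn needle (PySem.Str.lower line) = true
    · -- match with room: defer a new pending snippet, count down
      rw [if_pos hc]
      have happ := ih (k + 1) (remaining - 1)
        (some ((k : Int) + 1, (lines.take k).drop (k - 1) ++ [line]))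
        (contexts ++ fwcFlush pending (line :: rest')) hrest'
      rw [hprev1, ← hcast] at happ
      rw [happ]
      -- the new pending flushes to exactly A's snippet fwcCtx lines k
      have hflush : fwcFlush (some ((k : Int) + 1, (lines.take k).drop (k - 1) ++ [line]))
          rest' = [fwcCtx lines (k : Int)] := by
        simp only [fwcFlush]
        rw [fwcCtx_window lines k hk]
        have hwin : (lines.drop k).take 2 = line :: rest'.take 1 := by
          rw [← hrest]
          rfl
        rw [hwin]
        simp
      rw [hflush, henum, List.filter_cons_of_pos (by simpa using hc.2), List.map_cons]
      have htake : remaining.toNat = (remaining - 1).toNat + 1 := by omega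
      rw [htake, List.take_succ_cons, List.map_cons]
      simp [List.append_assoc]
    · -- no deferred snippet: either no match here, or no slots left
      rw [if_neg hc]
      have happ := ih (k + 1) remaining none
        (contexts ++ fwcFlush pending (line :: rest')) hrest'
      rw [hprev1, ← hcast] at happ
      rw [happ]
      simp only [fwcFlush, List.append_nil]
      rw [henum]
      by_cases hm : PySem.Str.isIn needle (PySem.Str.lower line) = true
      · have hr0 : remaining ≤ 0 := by
          by_contra hpos
          exact hc ⟨by omega, hm⟩
        have h0 : remaining.toNat = 0 := by omega
        simp [h0]
      · rw [List.filter_cons_of_neg (by simpa using hm)]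

-- B in closed form: the snippets of the first max(0, mc) matching line indices
theorem alt_eq (content word : String) (mc : Int) :
    find_word_contexts_alt content word mc =
      ((((PySem.List.enumerate (fwcLines content) 0).filter
          (fun p => PySem.Str.isIn (PySem.Str.lower word) (PySem.Str.lower p.2))).map Prod.fst).take
            mc.toNat).map (fwcCtx (fwcLines content)) := by
  have h := fwcLoopB_eq (PySem.Str.lower word) (fwcLines content) (fwcLines content) 0 mc none []
    (by simp)
  simpa [find_word_contexts_alt, fwcFlush] using h

-- ===== VERDICT (by name: the statement is the Claim_ definition above) =====
theorem find_word_contexts_spec : Claim_unchanged_find_word_contexts := by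
  intro content word mc _ hnd
  show find_word_contexts content word mc = find_word_contexts_alt content word mc
  by_cases hmc : (0:Int) < mc
  · rw [alt_eq]
    show fwcLoopA (fwcLines content) word mc (PySem.List.enumerate (fwcLines content) 0) [] = _
    rw [fwcLoopA_eq (fwcLines content) word mc _ [] (by simpa using hmc)]
    simp
  · -- mc ≤ 0 and ¬D_ : no line matches
    have hnone : ∀ line ∈ fwcLines content,
        PySem.Str.isIn (PySem.Str.lower word) (PySem.Str.lower line) = false := by
      intro line hline
      by_contra hc
      exact hnd ⟨by omega, List.any_eq_true.mpr ⟨line, hline, by simpa using hc⟩⟩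
    have hfilt : ∀ p ∈ PySem.List.enumerate (fwcLines content) 0,
        PySem.Str.isIn (PySem.Str.lower word) (PySem.Str.lower p.2) = false := by
      intro p hp
      refine hnone p.2 ?_
      have hmap := PySem.List.map_snd_enumerate (xs := fwcLines content) (s := 0)
      exact hmap ▸ List.mem_map_of_mem hp
    rw [alt_eq]
    show fwcLoopA (fwcLines content) word mc (PySem.List.enumerate (fwcLines content) 0) [] = _
    rw [fwcLoopA_no_match (fwcLines content) word mc _ [] hfilt,
      List.filter_eq_nil_iff.mpr (by intro p hp; simpa using hfilt p hp)]
    simp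

theorem find_word_contexts_changed : Claim_changed_find_word_contexts := by
  unfold Claim_changed_find_word_contexts; decide

theorem find_word_contexts_tight : Claim_exact_find_word_contexts := by
  intro content word mc _ hd
  obtain ⟨hmc, hany⟩ := hd
  obtain ⟨line, hline, hm⟩ := List.any_eq_true.mp hany
  have hA : find_word_contexts content word mc ≠ [] := by
    obtain ⟨k, hk, hlk⟩ := List.mem_iff_getElem.mp hline
    refine fwcLoopA_ne_nil (fwcLines content) word mc _ [] (Or.inl ⟨((k : Int), line), ?_, by simpa using hm⟩)
    rw [PySem.List.mem_enumerate_iff]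
    refine ⟨k, by simpa [fwcLines] using hk, ?_⟩
    simp only [fwcLines]
    rw [hlk]
    simp
  have hB : find_word_contexts_alt content word mc = [] := by
    rw [alt_eq]
    have h0 : mc.toNat = 0 := by omega
    simp [h0]
  intro he
  exact hA (he.trans hB)
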